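-- pv_equiv track=rewrite | github.com/oneturkmen/aoc2023 | 14/sol.py | calc
-- ===== SOURCE A (Python) =====
-- def calc(grid):
--     n = len(grid)
--     m = len(grid[0])
--     ans = 0
--     for r in range(n):
--         counts = len([char for char in grid[r] if char == 'O'])
--         ans += counts * (n - r)
--     return ans
-- ===== SOURCE B (Python) =====
-- def calc(grid):
--     ans = 0
--     running = 0
--     for row in grid:
--         running += sum(1 for ch in row if ch == 'O')
--         ans += running
--     return ans
-- ===== Notes on version B (the rewrite author's own statement) =====
-- stated objective: alternative
-- what changed: Replaces the per-row multiplication of O-count by weight (n-r) with a prefix-sum accumulator: a running cumulative O-count is added to the answer once per row, eliminating both the index-based range loop and the multiplication.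
import Mathlib
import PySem

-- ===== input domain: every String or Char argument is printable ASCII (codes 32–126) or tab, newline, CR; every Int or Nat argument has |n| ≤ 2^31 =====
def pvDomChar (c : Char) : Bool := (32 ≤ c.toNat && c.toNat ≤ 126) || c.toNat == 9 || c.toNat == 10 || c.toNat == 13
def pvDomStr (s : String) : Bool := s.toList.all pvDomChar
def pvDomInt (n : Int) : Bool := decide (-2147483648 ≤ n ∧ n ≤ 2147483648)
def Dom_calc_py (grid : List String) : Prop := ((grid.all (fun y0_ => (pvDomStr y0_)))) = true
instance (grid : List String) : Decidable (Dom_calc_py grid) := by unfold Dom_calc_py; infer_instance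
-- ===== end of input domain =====

-- B replaces A's per-row 'O-count × weight (n-r)' multiplication by a prefix-sum accumulator
-- (running cumulative O-count added to the answer once per row); equal values on nonempty grids.

-- ===== PORT A =====
def calc_py (grid : List String) : Int :=
  let n : Int := grid.length
  match PySem.List.pyGet? grid 0 with          -- grid[0]: IndexError on empty grid (excluded by Pre_)
  | none => 0
  | some row0 =>
    let _m : Int := PySem.Str.len row0
    (PySem.List.pyRange 0 n 1).foldl (fun ans r =>
      ans + (((PySem.List.pyGetD grid r "").toList.filter (fun c => c == 'O')).length : Int) * (n - r)) 0

-- ===== PORT B =====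
def calc_py_alt (grid : List String) : Int :=
  (grid.foldl (fun (p : Int × Int) row =>
      let running := p.2 + (row.toList.map (fun ch => if ch == 'O' then (1 : Int) else 0)).sum
      (p.1 + running, running)) (0, 0)).1

-- ===== PRECONDITION & SPEC =====
-- Pre_ excludes exactly the empty grid, on which A's 'len(grid[0])' raises IndexError.
def Pre_calc_py (grid : List String) : Prop := grid ≠ []
instance (grid : List String) : Decidable (Pre_calc_py grid) := by unfold Pre_calc_py; infer_instance
def pvWitness_calc_py : List String := ["O.O", ".O.", "..."]

def Spec_calc_py (grid : List String) (out : Int) : Prop := out = calc_py_alt grid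
instance (grid : List String) (out : Int) : Decidable (Spec_calc_py grid out) := by unfold Spec_calc_py; infer_instance

-- ===== CLAIM (what is proved, stated in full; the proofs are below) =====
def Claim_equal_calc_py : Prop := ∀ (grid : List String), Dom_calc_py grid → Pre_calc_py grid → Spec_calc_py grid (calc_py grid)

-- ===== LEMMAS AND PROOFS =====

-- the O-count of a row, shared characterisation of both loops' per-row work
def pvCnt (row : String) : Int := ((row.toList.filter (fun c => c == 'O')).length : Int)

-- the weighted sum Σ cs[r]·(len−r), recursively
def pvW : List Int → Int
  | [] => 0
  | c :: cs => c * ((cs.length : Int) + 1) + pvW cs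

lemma pvCnt_eq_sum (row : String) :
    (row.toList.map (fun ch => if ch == 'O' then (1 : Int) else 0)).sum = pvCnt row := by
  unfold pvCnt
  induction row.toList with
  | nil => simp
  | cons c cs ih =>
    simp only [List.map_cons, List.sum_cons, List.filter_cons]
    simp only [beq_iff_eq] at ih ⊢
    by_cases h : c = 'O'
    · rw [if_pos h, ih, if_pos h, List.length_cons]
      push_cast; ring
    · rw [if_neg h, ih, if_neg h]
      ring

lemma B_fold (rows : List String) : ∀ (a s : Int),
    (rows.foldl (fun (p : Int × Int) row =>
        let running := p.2 + (row.toList.map (fun ch => if ch == 'O' then (1 : Int) else 0)).sum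
        (p.1 + running, running)) (a, s)).1
      = a + s * rows.length + pvW (rows.map pvCnt) := by
  induction rows with
  | nil => intro a s; simp [pvW]
  | cons row rest ih =>
    intro a s
    simp only [List.foldl_cons, pvCnt_eq_sum, List.map_cons, pvW, List.length_map, List.length_cons] at ih ⊢
    rw [ih]
    push_cast
    ring

lemma A_loop (grid : List String) : ∀ (d j : Nat), j + d = grid.length → ∀ (acc : Int),
    (PySem.List.pyRange (j : Int) (grid.length : Int) 1).foldl (fun ans r =>
        ans + (((PySem.List.pyGetD grid r "").toList.filter (fun c => c == 'O')).length : Int)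
          * ((grid.length : Int) - r)) acc
      = acc + pvW ((grid.drop j).map pvCnt) := by
  intro d
  induction d with
  | zero =>
    intro j hj acc
    have hj' : grid.length ≤ j := by omega
    rw [PySem.List.pyRange_one_eq_nil (by exact_mod_cast hj')]
    simp [List.drop_eq_nil_of_le hj', pvW]
  | succ d ih =>
    intro j hj acc
    have hjl : j < grid.length := by omega
    rw [PySem.List.pyRange_one_cons (by exact_mod_cast hjl)]
    rw [List.foldl_cons]
    have hcast : ((j : Int) + 1) = (((j + 1 : Nat)) : Int) := by push_cast; ring
    rw [hcast, ih (j + 1) (by omega)]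
    have hget : PySem.List.pyGetD grid (j : Int) "" = grid[j] := by
      simp [PySem.List.pyGetD_natCast, List.getD_eq_getElem?_getD, hjl]
    rw [hget]
    have hdrop : grid.drop j = grid[j] :: grid.drop (j + 1) := List.drop_eq_getElem_cons hjl
    rw [hdrop]
    simp only [List.map_cons, pvW, List.length_map, List.length_drop, pvCnt]
    have hlen : (((grid.length - (j + 1) : Nat)) : Int) = (grid.length : Int) - j - 1 := by omega
    rw [hlen]
    ring

-- ===== VERDICT (by name: the statement is the Claim_ definition above) =====
theorem calc_py_spec : Claim_equal_calc_py := by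
  intro grid _ hpre
  unfold Spec_calc_py calc_py calc_py_alt
  match hg : PySem.List.pyGet? grid 0 with
  | none =>
    exfalso
    rcases grid with _ | ⟨row, rest⟩
    · exact hpre rfl
    · simp at hg
  | some row0 =>
    simp only
    have hA := A_loop grid grid.length 0 (by omega) 0
    simp only [Nat.cast_zero, List.drop_zero] at hA
    rw [hA, B_fold]
    ring
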